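-- pv_equiv track=rewrite | github.com/SushrutGaikwad/dsa | 01_Pattern_Practice_Questions/015_number_pyramid_pattern/code.py | generate_number_pyramid
-- ===== SOURCE A (Python) =====
-- def generate_number_pyramid(n):
--     """
--     Function to return a pyramid pattern of numbers of height n as a list of strings.
--
--     Parameters:
--     n (int): The height of the pyramid.
--
--     Returns:
--     list: A list of strings where each string represents a row of the pyramid pattern.
--     """
--     output = []
--     for i in range(1, n + 1):
--         numbers = []
--         for j in range(1, i + 1):
--             numbers.append(" ".join(list(str(j))))
--         output.append(" ".join(numbers))
--
--     for i in range(n):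
--         output[i] = (" " * (n - i - 1)) + output[i] + (" " * (n - i - 1))
--
--     return output
-- ===== SOURCE B (Python) =====
-- def generate_number_pyramid(n):
--     """Single-pass variant: maintains a running row string instead of
--     rebuilding each row with an inner loop, and pads while emitting."""
--     output = []
--     row = ""
--     for i in range(1, n + 1):
--         digits = " ".join(str(i))
--         row = digits if i == 1 else row + " " + digits
--         pad = " " * (n - i)
--         output.append(pad + row + pad)
--     return output
-- ===== Notes on version B (the rewrite author's own statement) =====
-- stated objective: faster
-- what changed: Replaces A's nested row-building loop plus a second padding pass with one loop that extends a running row string and pads while emitting.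
import Mathlib
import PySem

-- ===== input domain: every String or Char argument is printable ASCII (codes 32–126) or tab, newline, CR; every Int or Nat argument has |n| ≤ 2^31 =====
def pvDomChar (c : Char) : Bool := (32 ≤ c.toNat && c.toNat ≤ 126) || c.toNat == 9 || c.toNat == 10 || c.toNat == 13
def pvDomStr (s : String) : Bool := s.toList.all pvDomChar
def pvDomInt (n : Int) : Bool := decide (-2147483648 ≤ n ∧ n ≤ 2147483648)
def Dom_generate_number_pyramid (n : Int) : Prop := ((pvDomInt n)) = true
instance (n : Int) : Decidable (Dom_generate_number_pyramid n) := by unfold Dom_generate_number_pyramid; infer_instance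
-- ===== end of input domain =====

-- B: one loop with a running row accumulator (no inner join loop, no second padding pass); measured faster.


-- ===== PORT A =====
def generate_number_pyramid (n : Int) : List String :=
  let output := (PySem.List.pyRange 1 (n + 1) 1).foldl (fun output i =>
    let numbers := (PySem.List.pyRange 1 (i + 1) 1).foldl (fun numbers j =>
      numbers ++ [PySem.Str.join " " ((PySem.Int.toStr j).toList.map (fun c => String.mk [c]))]) ([] : List String)
    output ++ [PySem.Str.join " " numbers]) ([] : List String)
  -- second pass: output[i] = " "*(n-i-1) + output[i] + " "*(n-i-1); the index is always in range,
  -- so the read is ported with pyGetD (exact here)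
  (PySem.List.pyRange 0 n 1).foldl (fun out i =>
    out.set i.toNat (String.mk (List.replicate (n - i - 1).toNat ' ') ++ PySem.List.pyGetD out i "" ++ String.mk (List.replicate (n - i - 1).toNat ' '))) output

-- ===== PORT B =====
def generate_number_pyramid_alt (n : Int) : List String :=
  ((PySem.List.pyRange 1 (n + 1) 1).foldl (fun (st : List String × String) i =>
    let digits := PySem.Str.join " " ((PySem.Int.toStr i).toList.map (fun c => String.mk [c]))
    let row := if i == 1 then digits else st.2 ++ " " ++ digits
    let pad := String.mk (List.replicate (n - i).toNat ' ')
    (st.1 ++ [pad ++ row ++ pad], row)) (([] : List String), "")).1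

-- ===== PRECONDITION & SPEC =====
def Spec_generate_number_pyramid (n : Int) (out : List String) : Prop := out = generate_number_pyramid_alt n
instance (n : Int) (out : List String) : Decidable (Spec_generate_number_pyramid n out) := by unfold Spec_generate_number_pyramid; infer_instance

-- ===== CLAIM (what is proved, stated in full; the proofs are below) =====
def Claim_equal_generate_number_pyramid : Prop := ∀ (n : Int), Dom_generate_number_pyramid n → Spec_generate_number_pyramid n (generate_number_pyramid n)

-- ===== LEMMAS AND PROOFS =====

/-- spaced digits of j, i.e. `" ".join(list(str(j)))` -/
def pvSp (j : Int) : String :=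
  PySem.Str.join " " ((PySem.Int.toStr j).toList.map (fun c => String.mk [c]))

def pvPad (k : Int) : String := String.mk (List.replicate k.toNat ' ')

/-- the unpadded row for 1-based height index m: `" ".join` of spaced digits 1..m -/
def pvRow (m : Nat) : String :=
  PySem.Str.join " " ((PySem.List.pyRange 1 ((m : Int) + 1) 1).map pvSp)

lemma chars_join_snoc (sep x : List Char) :
    ∀ (l : List (List Char)) (a : List Char),
    PySem.Chars.join sep ((a :: l) ++ [x]) = PySem.Chars.join sep (a :: l) ++ sep ++ x := by
  intro l
  induction l with
  | nil => intro a; simp [PySem.Chars.join_cons_cons, PySem.Chars.join_singleton]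
  | cons b l ih =>
    intro a
    rw [show (a :: b :: l) ++ [x] = a :: ((b :: l) ++ [x]) by simp,
        show (b :: l) ++ [x] = b :: (l ++ [x]) by simp,
        PySem.Chars.join_cons_cons]
    have h2 := ih b
    rw [show (b :: l) ++ [x] = b :: (l ++ [x]) by simp] at h2
    rw [h2, PySem.Chars.join_cons_cons]
    simp [List.append_assoc]

lemma join_snoc (xs : List String) (x : String) (h : xs ≠ []) :
    PySem.Str.join " " (xs ++ [x]) = PySem.Str.join " " xs ++ " " ++ x := by
  obtain ⟨a, l, rfl⟩ := List.exists_cons_of_ne_nil h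
  apply String.ext
  simpa [PySem.Str.toList_join] using chars_join_snoc " ".toList x.toList (l.map String.toList) a.toList

lemma join_singleton_str (x : String) : PySem.Str.join " " [x] = x := by
  apply String.ext
  simp [PySem.Str.toList_join, PySem.Chars.join_singleton]

lemma pvRow_zero : pvRow 0 = "" := by
  apply String.ext
  have h0 : PySem.List.pyRange 1 (((0 : Nat) : Int) + 1) 1 = [] :=
    PySem.List.pyRange_one_eq_nil (by omega)
  simp [pvRow, PySem.Str.toList_join, PySem.Chars.join_nil]

lemma pvRow_succ (m : Nat) :
    pvRow (m + 1) = if m = 0 then pvSp 1 else pvRow m ++ " " ++ pvSp ((m : Int) + 1) := by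
  unfold pvRow
  have hcast : (((m + 1 : Nat) : Int)) + 1 = ((m : Int) + 1) + 1 := by push_cast; ring
  rw [hcast, PySem.List.pyRange_one_succ_right (by omega : (1 : Int) ≤ (m : Int) + 1), List.map_append,
      List.map_cons, List.map_nil]
  rcases Nat.eq_zero_or_pos m with hm | hm
  · subst hm
    have h1 : PySem.List.pyRange 1 ((Nat.cast 0 : Int) + 1) 1 = [] :=
      PySem.List.pyRange_one_eq_nil (by omega)
    rw [h1]
    simp [join_singleton_str]
  · have hlen : (PySem.List.pyRange 1 ((m : Int) + 1) 1).length = m := by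
      rw [PySem.List.length_pyRange_one]; omega
    have hne : (PySem.List.pyRange 1 ((m : Int) + 1) 1).map pvSp ≠ [] := by
      intro hnil
      have hl := congrArg List.length hnil
      simp [hlen] at hl
      omega
    rw [join_snoc _ _ hne]
    simp [Nat.pos_iff_ne_zero.mp hm]

/-- A's second loop: in-range `out[i] = g(i, out[i])` over all indices is a map with index. -/
lemma setfold (g : Int → String → String) :
    ∀ (xs pre : List String),
    (PySem.List.pyRange (pre.length : Int) ((pre.length : Int) + xs.length) 1).foldl
      (fun out i => out.set i.toNat (g i (PySem.List.pyGetD out i ""))) (pre ++ xs)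
    = pre ++ (xs.zipIdx pre.length).map (fun p => g (p.2 : Int) p.1) := by
  intro xs
  induction xs with
  | nil => intro pre; simp [PySem.List.pyRange_one_eq_nil]
  | cons x xs ih =>
    intro pre
    have hcons : PySem.List.pyRange (pre.length : Int) ((pre.length : Int) + ((x :: xs).length : Int)) 1
        = (pre.length : Int) :: PySem.List.pyRange ((pre.length : Int) + 1) ((pre.length : Int) + ((x :: xs).length : Int)) 1 :=
      PySem.List.pyRange_one_cons (by simp only [List.length_cons]; push_cast; omega)
    rw [hcons, List.foldl_cons]
    have hget : PySem.List.pyGetD (pre ++ x :: xs) (pre.length : Int) "" = x := by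
      rw [PySem.List.pyGetD_eq_getElem _ _ (Int.natCast_nonneg _)
            (by simp only [List.length_append, List.length_cons]; push_cast; omega)]
      simp only [Int.toNat_natCast]
      rw [List.getElem_append_right (Nat.le_refl pre.length)]
      simp
    have hset : (pre ++ x :: xs).set ((pre.length : Int)).toNat (g (pre.length : Int) x)
        = (pre ++ [g (pre.length : Int) x]) ++ xs := by
      rw [Int.toNat_natCast, List.set_append]
      simp
    rw [hget, hset]
    have ih' := ih (pre ++ [g (pre.length : Int) x])
    have hlen : (((pre ++ [g (pre.length : Int) x]).length : Nat) : Int) = (pre.length : Int) + 1 := by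
      simp
    rw [hlen] at ih'
    have hend : ((pre.length : Int) + 1) + (xs.length : Int) = (pre.length : Int) + ((x :: xs).length : Int) := by
      simp only [List.length_cons]; push_cast; ring
    rw [hend] at ih'
    rw [ih']
    simp [List.zipIdx_cons, List.append_assoc]

/-- B's loop invariant. -/
lemma b_inv (n : Int) :
    ∀ (m : Nat),
    (PySem.List.pyRange 1 ((m : Int) + 1) 1).foldl (fun (st : List String × String) i =>
      let digits := PySem.Str.join " " ((PySem.Int.toStr i).toList.map (fun c => String.mk [c]))
      let row := if i == 1 then digits else st.2 ++ " " ++ digits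
      let pad := String.mk (List.replicate (n - i).toNat ' ')
      (st.1 ++ [pad ++ row ++ pad], row)) (([] : List String), "")
    = ((List.range m).map (fun (k : Nat) =>
        pvPad (n - ((k : Int) + 1)) ++ pvRow (k + 1) ++ pvPad (n - ((k : Int) + 1))), pvRow m) := by
  intro m
  induction m with
  | zero =>
    have h0 : PySem.List.pyRange 1 (((0 : Nat) : Int) + 1) 1 = [] :=
      PySem.List.pyRange_one_eq_nil (by omega)
    simp [pvRow_zero]
  | succ m ih =>
    have hsr : PySem.List.pyRange 1 (((m + 1 : Nat) : Int) + 1) 1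
        = PySem.List.pyRange 1 ((m : Int) + 1) 1 ++ [(m : Int) + 1] := by
      rw [show (((m + 1 : Nat) : Int)) + 1 = ((m : Int) + 1) + 1 by push_cast; ring]
      exact PySem.List.pyRange_one_succ_right (by omega)
    rw [hsr, List.foldl_append, ih, List.foldl_cons, List.foldl_nil]
    dsimp only []
    have hrow : (if (((m : Int) + 1) == 1) = true then
          PySem.Str.join " " ((PySem.Int.toStr ((m : Int) + 1)).toList.map (fun c => String.mk [c]))
        else pvRow m ++ " " ++ PySem.Str.join " " ((PySem.Int.toStr ((m : Int) + 1)).toList.map (fun c => String.mk [c])))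
        = pvRow (m + 1) := by
      rw [pvRow_succ]
      rcases Nat.eq_zero_or_pos m with hm | hm
      · subst hm; simp [pvSp]
      · have h1 : (((m : Int) + 1) == 1) = false := by
          simp only [beq_eq_false_iff_ne, ne_eq]
          omega
        rw [h1]
        simp [Nat.pos_iff_ne_zero.mp hm, pvSp]
    rw [hrow]
    simp only [Prod.mk.injEq]
    refine ⟨?_, trivial⟩
    simp [List.range_succ, pvPad]

/-- A's first loop produces the unpadded rows. -/
lemma a_rows (n : Int) :
    (PySem.List.pyRange 1 (n + 1) 1).foldl (fun output i =>
      let numbers := (PySem.List.pyRange 1 (i + 1) 1).foldl (fun numbers j =>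
        numbers ++ [PySem.Str.join " " ((PySem.Int.toStr j).toList.map (fun c => String.mk [c]))]) ([] : List String)
      output ++ [PySem.Str.join " " numbers]) ([] : List String)
    = (List.range n.toNat).map (fun k => pvRow (k + 1)) := by
  have hstep : ∀ (l : List Int) (acc : List String),
      l.foldl (fun output i =>
        let numbers := (PySem.List.pyRange 1 (i + 1) 1).foldl (fun numbers j =>
          numbers ++ [PySem.Str.join " " ((PySem.Int.toStr j).toList.map (fun c => String.mk [c]))]) ([] : List String)
        output ++ [PySem.Str.join " " numbers]) acc
      = acc ++ l.map (fun i => PySem.Str.join " " ((PySem.List.pyRange 1 (i + 1) 1).map pvSp)) := by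
    intro l
    induction l with
    | nil => intro acc; simp
    | cons i l ih =>
      intro acc
      rw [List.foldl_cons, ih]
      dsimp only []
      rw [PySem.List.foldl_append_singleton_eq_map
            (fun j => PySem.Str.join " " ((PySem.Int.toStr j).toList.map (fun c => String.mk [c])))]
      simp only [List.map_cons, List.append_assoc, List.singleton_append]
      congr 3
  rw [hstep]
  rw [PySem.List.pyRange_one]
  rw [show (n + 1 - 1).toNat = n.toNat by omega]
  rw [List.map_map, List.nil_append]
  apply List.map_congr_left
  intro k hk
  unfold pvRow
  simp only [Function.comp]
  congr 3
  push_cast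
  ring

lemma zipIdx_range_map {β : Type} (h : Nat → β) (m : Nat) :
    ((List.range m).map h).zipIdx 0 = (List.range m).map (fun k => (h k, k)) := by
  apply List.ext_getElem
  · simp
  · intro i h1 h2
    simp [List.getElem_zipIdx]

-- ===== VERDICT (by name: the statement is the Claim_ definition above) =====
theorem generate_number_pyramid_spec : Claim_equal_generate_number_pyramid := by
  intro n _
  unfold Spec_generate_number_pyramid generate_number_pyramid generate_number_pyramid_alt
  by_cases hn : n ≤ 0
  · have h1 : PySem.List.pyRange 1 (n + 1) 1 = [] := PySem.List.pyRange_one_eq_nil (by omega)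
    have h2 : PySem.List.pyRange 0 n 1 = [] := PySem.List.pyRange_one_eq_nil (by omega)
    simp [h1, h2]
  · have hn' : 0 ≤ n := by omega
    obtain ⟨m, rfl⟩ : ∃ m : Nat, n = (m : Int) := ⟨n.toNat, (Int.toNat_of_nonneg hn').symm⟩
    dsimp only
    rw [a_rows, b_inv _ m, Int.toNat_natCast]
    have H := setfold (fun i s => String.mk (List.replicate (((m : Nat) : Int) - i - 1).toNat ' ') ++ s ++
        String.mk (List.replicate (((m : Nat) : Int) - i - 1).toNat ' ')) ((List.range m).map (fun k => pvRow (k + 1))) []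
    simp only [List.nil_append, List.length_nil, Nat.cast_zero, zero_add, List.length_map,
      List.length_range] at H
    rw [H, zipIdx_range_map, List.map_map]
    apply List.map_congr_left
    intro k hk
    simp only [Function.comp, pvPad]
    congr 2
    all_goals (congr 2; omega)
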